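-- pv_equiv track=rewrite | github.com/mla133/pyModbusTCP_extension | LACTtestscript.py | word_list_to_longlong
-- ===== SOURCE A (Python) =====
-- def word_list_to_longlong(val_list, big_endian=True):
--     """Word list (16 bits int) to long list (64 bits int)
--
--         By default word_list_to_long() use big endian order. For use little endian, set
--         big_endian param to False.
--
--         :param val_list: list of 16 bits int value
--         :type val_list: list
--         :param big_endian: True for big endian/False for little (optional)
--         :type big_endian: bool
--         :returns: list of 64 bits int value
--         :rtype: list
--     """
--     # allocate list for long int
--     longlong_list = [None] * int(len(val_list) / 4)
--     # fill registers list with register items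
--     for i, item in enumerate(longlong_list):
--         if big_endian:
--            longlong_list [i] = (val_list[i * 4] << 48) + (val_list[(i * 4) + 1] << 32) + (val_list[(i * 4) + 2] << 16) + val_list[(i * 4) + 3]
--         else:
--             longlong_list [i] = (val_list[(i * 4) + 3] << 48) + (val_list[(i * 4) + 2] << 32) + (val_list[(i * 4) + 1] << 16) + val_list[i * 4]
--     # return longlong_list list
--     return longlong_list
-- ===== SOURCE B (Python) =====
-- def word_list_to_longlong(val_list, big_endian=True):
--     """Word list (16 bits int) to long list (64 bits int).
--
--     Same contract as the original, but each 64-bit value is built by an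
--     accumulator fold over the 4-word slice of the group, with endianness
--     handled by reversing the slice instead of swapping index expressions.
--     """
--     out = []
--     for i in range(len(val_list) // 4):
--         group = val_list[i * 4:i * 4 + 4]
--         if not big_endian:
--             group = group[::-1]
--         acc = 0
--         for w in group:
--             acc = (acc << 16) + w
--         out.append(acc)
--     return out
-- ===== Notes on version B (the rewrite author's own statement) =====
-- stated objective: idiomatic
-- what changed: Each 64-bit value is computed by an accumulator fold (acc = (acc << 16) + w) over the 4-word slice of the group, with endianness handled by reversing the slice, instead of four hardcoded shift-and-add index expressions per branch into a preallocated [None]*n list.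
import Mathlib
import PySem

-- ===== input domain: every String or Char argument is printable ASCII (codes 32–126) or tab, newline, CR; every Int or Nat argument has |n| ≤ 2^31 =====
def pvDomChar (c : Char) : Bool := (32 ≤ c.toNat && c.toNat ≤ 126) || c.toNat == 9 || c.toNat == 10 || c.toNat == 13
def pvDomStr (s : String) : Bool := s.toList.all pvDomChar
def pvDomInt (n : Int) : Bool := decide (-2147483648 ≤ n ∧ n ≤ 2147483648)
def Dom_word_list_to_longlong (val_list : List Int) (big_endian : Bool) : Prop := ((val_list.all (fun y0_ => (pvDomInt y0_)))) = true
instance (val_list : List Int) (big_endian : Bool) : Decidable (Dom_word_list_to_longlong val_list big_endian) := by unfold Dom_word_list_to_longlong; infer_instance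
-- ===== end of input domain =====

-- B builds each 64-bit value by an accumulator fold over the (endianness-reversed) 4-word slice
-- instead of four hardcoded shift-and-add index expressions per branch (objective: idiomatic).


-- ===== PORT A =====
-- loop over enumerate([None]*n) filling slot i with the four shift-and-add terms;
-- ported as a map over the indices 0..n-1 (the enumerated items are all None and unused);
-- val_list[j] is PySem.List.pyGetD (the index is always in range, so the default 0 is never used).
def word_list_to_longlong (val_list : List Int) (big_endian : Bool) : List Int :=
  (List.range (val_list.length / 4)).map (fun (i : Nat) =>
    if big_endian then
      (PySem.List.pyGetD val_list ((i : Int) * 4) 0) <<< (48 : Nat)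
        + (PySem.List.pyGetD val_list ((i : Int) * 4 + 1) 0) <<< (32 : Nat)
        + (PySem.List.pyGetD val_list ((i : Int) * 4 + 2) 0) <<< (16 : Nat)
        + PySem.List.pyGetD val_list ((i : Int) * 4 + 3) 0
    else
      (PySem.List.pyGetD val_list ((i : Int) * 4 + 3) 0) <<< (48 : Nat)
        + (PySem.List.pyGetD val_list ((i : Int) * 4 + 2) 0) <<< (32 : Nat)
        + (PySem.List.pyGetD val_list ((i : Int) * 4 + 1) 0) <<< (16 : Nat)
        + PySem.List.pyGetD val_list ((i : Int) * 4) 0)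

-- ===== PORT B =====
def word_list_to_longlong_alt (val_list : List Int) (big_endian : Bool) : List Int :=
  (List.range (val_list.length / 4)).foldl (fun out (i : Nat) =>
    let group := PySem.List.slice val_list (some ((i : Int) * 4)) (some ((i : Int) * 4 + 4))
    let group := if big_endian then group else group.reverse
    out ++ [group.foldl (fun (acc : Int) w => acc <<< (16 : Nat) + w) (0 : Int)]) []

-- ===== PRECONDITION & SPEC =====
def Spec_word_list_to_longlong (val_list : List Int) (big_endian : Bool) (out : List Int) : Prop := out = word_list_to_longlong_alt val_list big_endian
instance (val_list : List Int) (big_endian : Bool) (out : List Int) : Decidable (Spec_word_list_to_longlong val_list big_endian out) := by unfold Spec_word_list_to_longlong; infer_instance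

-- ===== CLAIM (what is proved, stated in full; the proofs are below) =====
def Claim_equal_word_list_to_longlong : Prop := ∀ (val_list : List Int) (big_endian : Bool), Dom_word_list_to_longlong val_list big_endian → Spec_word_list_to_longlong val_list big_endian (word_list_to_longlong val_list big_endian)

-- ===== LEMMAS AND PROOFS =====

-- take 4 after drop j, when j+4 words exist, is the explicit 4-element group
lemma pv_take4 (xs : List Int) (j : Nat) (h : j + 4 ≤ xs.length)
    (h0 : j < xs.length) (h1 : j + 1 < xs.length) (h2 : j + 2 < xs.length) (h3 : j + 3 < xs.length) :
    (xs.drop j).take 4 = [xs[j], xs[j+1], xs[j+2], xs[j+3]] := by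
  apply List.ext_getElem
  · simp; omega
  · intro k hk _
    simp only [List.getElem_take, List.getElem_drop]
    have hk4 : k < 4 := by simp at hk; omega
    interval_cases k <;> simp

-- the per-group values of the two ports agree
lemma pv_elem_eq (xs : List Int) (be : Bool) (i : Nat) (hi : i < xs.length / 4) :
    (if be then
      (PySem.List.pyGetD xs ((i : Int) * 4) 0) <<< (48 : Nat)
        + (PySem.List.pyGetD xs ((i : Int) * 4 + 1) 0) <<< (32 : Nat)
        + (PySem.List.pyGetD xs ((i : Int) * 4 + 2) 0) <<< (16 : Nat)
        + PySem.List.pyGetD xs ((i : Int) * 4 + 3) 0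
    else
      (PySem.List.pyGetD xs ((i : Int) * 4 + 3) 0) <<< (48 : Nat)
        + (PySem.List.pyGetD xs ((i : Int) * 4 + 2) 0) <<< (32 : Nat)
        + (PySem.List.pyGetD xs ((i : Int) * 4 + 1) 0) <<< (16 : Nat)
        + PySem.List.pyGetD xs ((i : Int) * 4) 0) =
    ((if be then PySem.List.slice xs (some ((i : Int) * 4)) (some ((i : Int) * 4 + 4))
      else (PySem.List.slice xs (some ((i : Int) * 4)) (some ((i : Int) * 4 + 4))).reverse).foldl
        (fun (acc : Int) w => acc <<< (16 : Nat) + w) (0 : Int)) := by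
  have h4 : 4 * i + 4 ≤ xs.length := by omega
  have h0 : 4 * i < xs.length := by omega
  have h1 : 4 * i + 1 < xs.length := by omega
  have h2 : 4 * i + 2 < xs.length := by omega
  have h3 : 4 * i + 3 < xs.length := by omega
  have hs : PySem.List.slice xs (some ((i : Int) * 4)) (some ((i : Int) * 4 + 4))
      = [xs[4*i], xs[4*i+1], xs[4*i+2], xs[4*i+3]] := by
    rw [PySem.List.slice_toNat xs (by positivity) (by positivity)]
    have ha : ((i : Int) * 4).toNat = 4 * i := by omega
    have hb : ((i : Int) * 4 + 4).toNat = 4 * i + 4 := by omega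
    rw [ha, hb]
    have : 4 * i + 4 - 4 * i = 4 := by omega
    rw [this, pv_take4 xs (4*i) h4 h0 h1 h2 h3]
  have g0 : PySem.List.pyGetD xs ((i : Int) * 4) 0 = xs[4*i] := by
    have : (i : Int) * 4 = ((4 * i : Nat) : Int) := by push_cast; ring
    rw [this, PySem.List.pyGetD_natCast]; simp [List.getD_eq_getElem?_getD, h0]
  have g1 : PySem.List.pyGetD xs ((i : Int) * 4 + 1) 0 = xs[4*i+1] := by
    have : (i : Int) * 4 + 1 = ((4 * i + 1 : Nat) : Int) := by push_cast; ring
    rw [this, PySem.List.pyGetD_natCast]; simp [List.getD_eq_getElem?_getD, h1]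
  have g2 : PySem.List.pyGetD xs ((i : Int) * 4 + 2) 0 = xs[4*i+2] := by
    have : (i : Int) * 4 + 2 = ((4 * i + 2 : Nat) : Int) := by push_cast; ring
    rw [this, PySem.List.pyGetD_natCast]; simp [List.getD_eq_getElem?_getD, h2]
  have g3 : PySem.List.pyGetD xs ((i : Int) * 4 + 3) 0 = xs[4*i+3] := by
    have : (i : Int) * 4 + 3 = ((4 * i + 3 : Nat) : Int) := by push_cast; ring
    rw [this, PySem.List.pyGetD_natCast]; simp [List.getD_eq_getElem?_getD, h3]
  rw [hs, g0, g1, g2, g3]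
  cases be <;> simp [List.foldl, Int.shiftLeft_eq] <;> ring

-- ===== VERDICT (by name: the statement is the Claim_ definition above) =====
theorem word_list_to_longlong_spec : Claim_equal_word_list_to_longlong := by
  intro xs be _
  unfold Spec_word_list_to_longlong word_list_to_longlong word_list_to_longlong_alt
  rw [PySem.List.foldl_append_singleton_eq_map]
  apply List.map_congr_left
  intro i hi
  have hi' := List.mem_range.mp hi
  exact pv_elem_eq xs be i hi'
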